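-- pv_equiv track=rewrite | github.com/Junya-0220/python_algo | udemy/quiz/list_snake.py | snake_string_v1
-- ===== SOURCE A (Python) =====
-- from typing import List
--
-- def snake_string_v1(chars: str) -> List[List[str]]:
--     result = [[],[],[]]
--     result_index = {0,1,2}
--     insert_index = 1
--     for i,s in enumerate(chars):
--         if i % 4 == 1:
--             insert_index = 0
--         elif i % 2 == 0:
--             insert_index = 1
--         elif i % 4 == 3:
--             insert_index = 2
--         result[insert_index].append(s)
--         for rest_index in result_index - {insert_index}:
--             result[rest_index].append(' ')
--     return result
-- ===== SOURCE B (Python) =====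
-- def snake_string_v1(chars):
--     ROW = [1, 0, 1, 2]
--     return [[c if ROW[i % 4] == r else ' ' for i, c in enumerate(chars)]
--             for r in range(3)]
-- ===== Notes on version B (the rewrite author's own statement) =====
-- stated objective: simpler
-- what changed: Replaces the single stateful pass (carried insert_index, appends to all three rows plus a set-difference inner loop) with a 4-entry row lookup table and three independent per-row passes over the enumerated string.
import Mathlib
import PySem

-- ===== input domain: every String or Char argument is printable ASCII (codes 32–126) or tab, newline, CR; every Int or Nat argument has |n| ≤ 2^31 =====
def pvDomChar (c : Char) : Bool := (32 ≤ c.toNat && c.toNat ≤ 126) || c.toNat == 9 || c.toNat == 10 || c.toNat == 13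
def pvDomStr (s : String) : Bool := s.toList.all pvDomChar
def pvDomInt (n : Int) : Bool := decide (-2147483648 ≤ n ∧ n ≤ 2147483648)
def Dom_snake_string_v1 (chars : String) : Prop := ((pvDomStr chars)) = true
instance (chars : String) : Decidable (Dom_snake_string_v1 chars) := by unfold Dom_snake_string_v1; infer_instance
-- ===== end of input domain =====

-- B replaces A's single stateful pass (carried insert_index + set-difference inner loop)
-- with a 4-entry row lookup table and three independent per-row passes (simpler decomposition).


-- ===== PORT A =====
-- one pass; state = (row0, row1, row2, insert_index); the elif chain kept in order,
-- the 'result_index - {insert_index}' inner loop appends ' ' to the two other rows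
def snakeStepA (st : List String × List String × List String × Int) (p : Int × Char) :
    List String × List String × List String × Int :=
  let (r0, r1, r2, prev) := st
  let (i, s) := p
  let insert_index : Int :=
    if PySem.Int.mod i 4 = 1 then 0
    else if PySem.Int.mod i 2 = 0 then 1
    else if PySem.Int.mod i 4 = 3 then 2
    else prev
  ((if insert_index = 0 then r0 ++ [s.toString] else r0 ++ [" "]),
   (if insert_index = 1 then r1 ++ [s.toString] else r1 ++ [" "]),
   (if insert_index = 2 then r2 ++ [s.toString] else r2 ++ [" "]),
   insert_index)

def snake_string_v1 (chars : String) : List (List String) :=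
  let st := (PySem.List.enumerate chars.toList).foldl snakeStepA ([], [], [], 1)
  [st.1, st.2.1, st.2.2.1]

-- ===== PORT B =====
def snake_string_v1_alt (chars : String) : List (List String) :=
  (List.range 3).map (fun r =>
    (PySem.List.enumerate chars.toList).map (fun p =>
      if PySem.List.pyGetD ([1, 0, 1, 2] : List Int) (PySem.Int.mod p.1 4) 0 = (r : Int)
      then p.2.toString else " "))

-- ===== PRECONDITION & SPEC =====
def Spec_snake_string_v1 (chars : String) (out : List (List String)) : Prop := out = snake_string_v1_alt chars
instance (chars : String) (out : List (List String)) : Decidable (Spec_snake_string_v1 chars out) := by unfold Spec_snake_string_v1; infer_instance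

-- ===== CLAIM (what is proved, stated in full; the proofs are below) =====
def Claim_equal_snake_string_v1 : Prop := ∀ (chars : String), Dom_snake_string_v1 chars → Spec_snake_string_v1 chars (snake_string_v1 chars)

-- ===== LEMMAS AND PROOFS =====
def rowB (r : Nat) (p : Int × Char) : String :=
  if PySem.List.pyGetD ([1, 0, 1, 2] : List Int) (PySem.Int.mod p.1 4) 0 = (r : Int)
  then p.2.toString else " "

-- helper: an if on which row gets the char, pushed inside the append
lemma append_ite (r : List String) (b : Prop) [Decidable b] (x y : String) :
    (if b then r ++ [x] else r ++ [y]) = r ++ [if b then x else y] := by split <;> rfl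

-- A's elif chain picks exactly B's table row, regardless of the carried state
lemma pick_eq (i : Int) (prev : Int) :
    (if PySem.Int.mod i 4 = 1 then (0 : Int)
     else if PySem.Int.mod i 2 = 0 then 1
     else if PySem.Int.mod i 4 = 3 then 2 else prev)
      = PySem.List.pyGetD ([1, 0, 1, 2] : List Int) (PySem.Int.mod i 4) 0 := by
  rw [PySem.Int.mod_eq_emod_of_pos (by norm_num), PySem.Int.mod_eq_emod_of_pos (by norm_num)]
  have h4 : i % 4 = 0 ∨ i % 4 = 1 ∨ i % 4 = 2 ∨ i % 4 = 3 := by omega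
  have h2 : i % 2 = i % 4 % 2 := by omega
  rcases h4 with h | h | h | h <;>
    simp [h2, h, PySem.List.pyGetD, PySem.List.pyGet?, PySem.List.pyIdx?]

lemma stepA_char (r0 r1 r2 : List String) (prev : Int) (i : Int) (c : Char) :
    snakeStepA (r0, r1, r2, prev) (i, c) =
      (r0 ++ [rowB 0 (i, c)], r1 ++ [rowB 1 (i, c)], r2 ++ [rowB 2 (i, c)],
        PySem.List.pyGetD ([1, 0, 1, 2] : List Int) (PySem.Int.mod i 4) 0) := by
  unfold snakeStepA rowB
  dsimp only
  rw [pick_eq i prev]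
  simp only [append_ite, Nat.cast_ofNat, Nat.cast_one, Nat.cast_zero]

lemma foldA_eq (l : List (Int × Char)) (r0 r1 r2 : List String) (prev : Int) :
    (l.foldl snakeStepA (r0, r1, r2, prev)).1 = r0 ++ l.map (rowB 0) ∧
    (l.foldl snakeStepA (r0, r1, r2, prev)).2.1 = r1 ++ l.map (rowB 1) ∧
    (l.foldl snakeStepA (r0, r1, r2, prev)).2.2.1 = r2 ++ l.map (rowB 2) := by
  induction l generalizing r0 r1 r2 prev with
  | nil => simp
  | cons p t ih =>
    obtain ⟨i, c⟩ := p
    rw [List.foldl_cons, stepA_char]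
    have := ih (r0 ++ [rowB 0 (i, c)]) (r1 ++ [rowB 1 (i, c)]) (r2 ++ [rowB 2 (i, c)])
      (PySem.List.pyGetD ([1, 0, 1, 2] : List Int) (PySem.Int.mod i 4) 0)
    simpa using this

-- ===== VERDICT (by name: the statement is the Claim_ definition above) =====
theorem snake_string_v1_spec : Claim_equal_snake_string_v1 := by
  intro chars _
  unfold Spec_snake_string_v1 snake_string_v1 snake_string_v1_alt
  obtain ⟨h0, h1, h2⟩ := foldA_eq (PySem.List.enumerate chars.toList) [] [] [] 1
  simp [h0, h1, h2, List.range_succ, rowB]
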